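-- pv_equiv track=rewrite | github.com/akhfadhil/Interpretative-Structural-Modelling | ISMt2.py | create_level_dict
-- ===== SOURCE A (Python) =====
-- def reverse_ranks(ranks):
--     max_rank = max(ranks)
--     reversed_ranks = [max_rank - rank + 1 for rank in ranks]
--     return reversed_ranks
--
-- def create_level_dict(codes, ranks):
--     # Create a list of (code, rank) pairs
--     code_rank_pairs = list(zip(codes, reverse_ranks(ranks)))
--
--     # Sort pairs by rank (ascending order)
--     sorted_pairs = sorted(code_rank_pairs, key=lambda x: x[1])
--
--     # Create the dictionary with levels
--     level_dict = {}
--     for code, rank in sorted_pairs: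
--         level = 'Level ' + str(rank)  # Level is determined by rank
--         if level not in level_dict:
--             level_dict[level] = []
--         level_dict[level].append(code)
--
--     return level_dict
-- ===== SOURCE B (Python) =====
-- def create_level_dict(codes, ranks):
--     # Group codes into buckets keyed by the reversed rank in one pass over the
--     # original order (stable), then emit buckets by ascending reversed rank.
--     max_rank = max(ranks)
--     buckets = {}
--     for code, rank in zip(codes, ranks):
--         buckets.setdefault(max_rank - rank + 1, []).append(code)
--     return {'Level ' + str(r): buckets[r] for r in sorted(buckets)}
-- ===== Notes on version B (the rewrite author's own statement) =====
-- stated objective: simpler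
-- what changed: Instead of sorting all (code, reversed-rank) pairs and grouping the sorted list into a dict, B buckets the codes by reversed rank in one pass over the original order and then sorts only the distinct rank keys to build the result.
import Mathlib
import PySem

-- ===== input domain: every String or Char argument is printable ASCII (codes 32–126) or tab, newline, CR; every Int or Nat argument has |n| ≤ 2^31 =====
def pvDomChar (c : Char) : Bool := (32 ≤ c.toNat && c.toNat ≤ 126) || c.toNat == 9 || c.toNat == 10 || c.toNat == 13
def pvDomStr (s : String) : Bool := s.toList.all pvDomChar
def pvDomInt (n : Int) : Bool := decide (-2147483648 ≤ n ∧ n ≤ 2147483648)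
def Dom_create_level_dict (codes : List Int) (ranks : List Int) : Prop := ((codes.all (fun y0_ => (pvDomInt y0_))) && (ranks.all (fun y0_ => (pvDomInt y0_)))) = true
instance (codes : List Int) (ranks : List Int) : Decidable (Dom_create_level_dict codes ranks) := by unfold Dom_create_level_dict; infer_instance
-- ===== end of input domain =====

-- B groups codes into rank buckets in one pass over the original order and sorts only
-- the distinct reversed-rank keys, instead of sorting all pairs and grouping the sorted
-- list (objective: simpler; same return value on every input where A returns).

-- ===== PORT A =====
def reverse_ranks (ranks : List Int) : List Int :=
  let max_rank : Int := ((PySem.List.max? ranks (fun x => x)).getD 0)  -- max(ranks); none (empty list) excluded by Pre_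
  ranks.map (fun rank => max_rank - rank + 1)

def create_level_dict (codes : List Int) (ranks : List Int) : List (String × List Int) :=
  let code_rank_pairs := codes.zip (reverse_ranks ranks)
  let sorted_pairs := PySem.List.sorted code_rank_pairs (fun x => x.2) false
  let level_dict := sorted_pairs.foldl (fun d p =>
      let level := "Level " ++ PySem.Int.toStr p.2
      let d := if d.contains level then d else d.insert level ([] : List Int)
      d.modify level [] (fun v => v ++ [p.1])) (PySem.Dict.empty)
  level_dict.items

-- ===== PORT B =====
def create_level_dict_alt (codes : List Int) (ranks : List Int) : List (String × List Int) :=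
  let max_rank : Int := ((PySem.List.max? ranks (fun x => x)).getD 0)  -- max(ranks); none (empty list) excluded by Pre_
  let buckets := (codes.zip ranks).foldl
      (fun d p => d.modify (max_rank - p.2 + 1) [] (fun v => v ++ [p.1]))
      (PySem.Dict.empty : PySem.Dict Int (List Int))
  (PySem.List.sorted buckets.keys (fun r => r) false).map
      (fun r => ("Level " ++ PySem.Int.toStr r, buckets.getD r []))

-- ===== PRECONDITION & SPEC =====
-- Pre_ excludes exactly ranks = [], where Python A raises ValueError in max(ranks).
def Pre_create_level_dict (codes : List Int) (ranks : List Int) : Prop := ranks ≠ []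
instance (codes : List Int) (ranks : List Int) : Decidable (Pre_create_level_dict codes ranks) := by unfold Pre_create_level_dict; infer_instance
def pvWitness_create_level_dict : List Int × List Int := ([1, 2, 3], [2, 1, 2])

def Spec_create_level_dict (codes : List Int) (ranks : List Int) (out : List (String × List Int)) : Prop := out = create_level_dict_alt codes ranks
instance (codes : List Int) (ranks : List Int) (out : List (String × List Int)) : Decidable (Spec_create_level_dict codes ranks out) := by unfold Spec_create_level_dict; infer_instance

-- ===== CLAIM (what is proved, stated in full; the proofs are below) =====
def Claim_equal_create_level_dict : Prop := ∀ (codes : List Int) (ranks : List Int), Dom_create_level_dict codes ranks → Pre_create_level_dict codes ranks → Spec_create_level_dict codes ranks (create_level_dict codes ranks)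

-- ===== LEMMAS AND PROOFS =====

theorem tdc_append (f : Nat) : ∀ (n : Nat) (acc : List Char),
    Nat.toDigitsCore 10 f n acc = Nat.toDigitsCore 10 f n [] ++ acc := by
  induction f with
  | zero => intro n acc; simp [Nat.toDigitsCore]
  | succ f ih =>
    intro n acc
    simp only [Nat.toDigitsCore]
    by_cases h : n / 10 = 0
    · simp [h]
    · simp only [h, if_false]
      rw [ih (n / 10) ((n % 10).digitChar :: acc), ih (n / 10) [(n % 10).digitChar]]
      simp

theorem tdc_fuel : ∀ (f f' n : Nat), n < f → n < f' →
    Nat.toDigitsCore 10 f n [] = Nat.toDigitsCore 10 f' n [] := by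
  intro f
  induction f with
  | zero => intro f' n h; omega
  | succ f ih =>
    intro f' n h h'
    cases f' with
    | zero => omega
    | succ f' =>
      simp only [Nat.toDigitsCore]
      by_cases hz : n / 10 = 0
      · simp [hz]
      · simp only [hz, if_false]
        rw [tdc_append f, tdc_append f']
        rw [ih f' (n / 10) (by omega) (by omega)]

theorem toDigits_lt (n : Nat) (h : n < 10) : Nat.toDigits 10 n = [Nat.digitChar n] := by
  simp [Nat.toDigits, Nat.toDigitsCore, Nat.div_eq_of_lt h, Nat.mod_eq_of_lt h]

theorem toDigits_ge (n : Nat) (h : 10 ≤ n) :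
    Nat.toDigits 10 n = Nat.toDigits 10 (n / 10) ++ [Nat.digitChar (n % 10)] := by
  show Nat.toDigitsCore 10 (n+1) n [] = _
  simp only [Nat.toDigitsCore]
  have hz : ¬ n / 10 = 0 := by omega
  simp only [hz, if_false]
  rw [tdc_append, Nat.toDigits]
  rw [tdc_fuel n (n / 10 + 1) (n / 10) (by omega) (by omega)]

theorem toDigits_ne_nil (n : Nat) : Nat.toDigits 10 n ≠ [] := by
  by_cases h : n < 10
  · rw [toDigits_lt n h]; simp
  · rw [toDigits_ge n (by omega)]; simp

theorem dash_not_mem_toDigits (n : Nat) : '-' ∉ Nat.toDigits 10 n := by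
  induction n using Nat.strong_induction_on with
  | _ n ih =>
    by_cases h : n < 10
    · rw [toDigits_lt n h]
      have hd : ∀ x < 10, Nat.digitChar x ≠ '-' := by decide
      simp only [List.mem_singleton]
      intro he; exact hd n h he.symm
    · rw [toDigits_ge n (by omega)]
      simp only [List.mem_append, List.mem_singleton]
      push Not
      refine ⟨ih (n / 10) (by omega), ?_⟩
      have h2 : n % 10 < 10 := Nat.mod_lt _ (by omega)
      have : ∀ x < 10, Nat.digitChar x ≠ '-' := by decide
      intro he; exact this _ h2 he.symm

theorem toDigits_inj : ∀ (n m : Nat), Nat.toDigits 10 n = Nat.toDigits 10 m → n = m := by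
  intro n
  induction n using Nat.strong_induction_on with
  | _ n ih =>
    intro m h
    by_cases hn : n < 10 <;> by_cases hm : m < 10
    · rw [toDigits_lt n hn, toDigits_lt m hm] at h
      have : ∀ x < 10, ∀ y < 10, Nat.digitChar x = Nat.digitChar y → x = y := by decide
      exact this n hn m hm (List.singleton_inj.mp h)
    · rw [toDigits_lt n hn, toDigits_ge m (by omega)] at h
      have := congrArg List.length h
      simp at this
      have := toDigits_ne_nil (m / 10)
      cases hmd : Nat.toDigits 10 (m / 10) with
      | nil => exact absurd hmd this
      | cons a l => rw [hmd] at h; simp at h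
    · rw [toDigits_ge n (by omega), toDigits_lt m hm] at h
      have := toDigits_ne_nil (n / 10)
      cases hnd : Nat.toDigits 10 (n / 10) with
      | nil => exact absurd hnd this
      | cons a l => rw [hnd] at h; simp at h
    · rw [toDigits_ge n (by omega), toDigits_ge m (by omega)] at h
      have h2 := List.append_inj' h (by simp)
      obtain ⟨h3, h4⟩ := h2
      have hd : ∀ x < 10, ∀ y < 10, Nat.digitChar x = Nat.digitChar y → x = y := by decide
      have hmod : n % 10 = m % 10 :=
        hd _ (Nat.mod_lt _ (by omega)) _ (Nat.mod_lt _ (by omega)) (List.singleton_inj.mp h4)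
      have hdiv : n / 10 = m / 10 := ih (n / 10) (by omega) (m / 10) h3
      omega

theorem toStr_inj (a b : Int) (h : PySem.Int.toStr a = PySem.Int.toStr b) : a = b := by
  have hc : PySem.Int.toChars a = PySem.Int.toChars b := by
    have := congrArg String.toList h
    simpa [PySem.Int.toList_toStr] using this
  unfold PySem.Int.toChars at hc
  by_cases ha : a < 0 <;> by_cases hb : b < 0 <;> simp [ha, hb] at hc
  · have := toDigits_inj _ _ hc; omega
  · exact absurd (hc ▸ List.mem_cons_self) (dash_not_mem_toDigits b.toNat)
  · exact absurd (hc ▸ List.mem_cons_self) (dash_not_mem_toDigits a.toNat)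
  · have := toDigits_inj _ _ hc; omega

theorem pv_filter_insertBy {α : Type} (key : α → Int) (c : Int) (x : α) :
    ∀ (ys : List α), ys.Pairwise (fun a b => key a ≤ key b) →
    (PySem.List.insertBy (fun a b => decide (key a < key b)) x ys).filter (fun y => key y == c) =
    if key x == c then (ys.filter (fun y => key y == c)) ++ [x]
    else ys.filter (fun y => key y == c) := by
  intro ys
  induction ys with
  | nil =>
    intro _
    by_cases h : (key x == c) = true <;> simp [PySem.List.insertBy, List.filter, h]
  | cons y ys ih =>
    intro hp
    simp only [PySem.List.insertBy]
    by_cases hlt : key x < key y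
    · simp only [decide_eq_true_eq, hlt, if_true]
      have hnil : (y :: ys).filter (fun z => key z == c) =
          (y :: ys).filter (fun z => key z == c) := rfl
      by_cases hxc : key x == c
      · have hc : key x = c := by simpa using hxc
        have hall : ∀ z ∈ y :: ys, ¬ (key z == c) = true := by
          intro z hz
          have : key y ≤ key z := by
            rcases List.mem_cons.mp hz with h | h
            · subst h; exact le_refl _
            · exact (List.pairwise_cons.mp hp).1 z h
          simp only [beq_iff_eq]
          omega
        rw [List.filter_eq_nil_iff.mpr hall]
        simp [List.filter, hxc, hall y List.mem_cons_self,
          List.filter_eq_nil_iff.mpr (fun z hz => hall z (List.mem_cons_of_mem y hz))]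
      · simp [List.filter, hxc]
    · simp only [decide_eq_true_eq, hlt, if_false]
      have htail := (List.pairwise_cons.mp hp).2
      rw [List.filter_cons, List.filter_cons, ih htail]
      by_cases hxc : key x == c <;> by_cases hyc : key y == c <;> simp [hxc, hyc]

theorem pv_sorted_filter {α : Type} (key : α → Int) (c : Int) (xs : List α) :
    (PySem.List.sorted xs key false).filter (fun y => key y == c) =
    xs.filter (fun y => key y == c) := by
  induction xs using List.reverseRecOn with
  | nil => simp [PySem.List.sorted]
  | append_singleton xs x ih =>
    rw [PySem.List.sorted_eq_foldl_insertBy, List.foldl_append]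
    simp only [List.foldl_cons, List.foldl_nil]
    rw [← PySem.List.sorted_eq_foldl_insertBy]
    rw [pv_filter_insertBy key c x _ (by
      have := PySem.List.sorted_pairwise xs key
      exact this)]
    rw [ih, List.filter_append]
    by_cases hxc : key x == c <;> simp [List.filter, hxc]

theorem pv_ofList_map (f : Int → String) (hf : ∀ a b : Int, f a = f b → a = b) (l : List Int) :
    PySem.Set.ofList (l.map f) = (PySem.Set.ofList l).map f := by
  induction l using List.reverseRecOn with
  | nil => rfl
  | append_singleton l x ih =>
    rw [List.map_append, List.map_singleton, PySem.Set.ofList_append_singleton,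
      PySem.Set.ofList_append_singleton, ih, PySem.Set.add_eq_ite, PySem.Set.add_eq_ite]
    by_cases hm : x ∈ PySem.Set.ofList l
    · have : f x ∈ (PySem.Set.ofList l).map f := List.mem_map_of_mem hm
      simp [hm, this]
    · have : f x ∉ (PySem.Set.ofList l).map f := by
        intro hc
        obtain ⟨a, ha, hfa⟩ := List.mem_map.mp hc
        exact hm (hf a x hfa ▸ ha)
      simp [hm, this]

theorem pv_ofList_pairwise_lt (l : List Int) (h : l.Pairwise (· ≤ ·)) :
    (PySem.Set.ofList l).Pairwise (· < ·) := by
  induction l using List.reverseRecOn with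
  | nil => exact List.Pairwise.nil
  | append_singleton l x ih =>
    have hp := List.pairwise_append.mp h
    rw [PySem.Set.ofList_append_singleton, PySem.Set.add_eq_ite]
    by_cases hm : x ∈ PySem.Set.ofList l
    · simp [hm, ih hp.1]
    · simp only [hm, if_false]
      rw [List.pairwise_append]
      refine ⟨ih hp.1, List.pairwise_singleton _ _, ?_⟩
      intro a ha b hb
      have hbx : b = x := List.mem_singleton.mp hb
      have hle : a ≤ x := hp.2.2 a ((PySem.Set.mem_ofList l a).mp ha) x (List.mem_singleton_self x)
      have hne : a ≠ x := fun he => hm (he ▸ ha)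
      omega

theorem pv_ofList_perm {l l' : List Int} (h : l.Perm l') :
    (PySem.Set.ofList l).Perm (PySem.Set.ofList l') := by
  rw [List.perm_ext_iff_of_nodup (PySem.Set.nodup_ofList l) (PySem.Set.nodup_ofList l')]
  intro a
  rw [PySem.Set.mem_ofList l a, PySem.Set.mem_ofList l' a]
  exact h.mem_iff

theorem lvl_inj (a b : Int)
    (h : "Level " ++ PySem.Int.toStr a = "Level " ++ PySem.Int.toStr b) : a = b :=
  toStr_inj a b ((String.append_right_inj "Level ").mp h)

theorem bodyA_eq (d : PySem.Dict String (List Int)) (k : String) (c : Int) :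
    (if d.contains k then d else d.insert k ([] : List Int)).modify k [] (fun v => v ++ [c])
    = d.modify k [] (fun v => v ++ [c]) := by
  by_cases h : d.contains k
  · simp [h]
  · simp only [h, Bool.false_eq_true, if_false, PySem.Dict.modify]
    rw [PySem.Dict.getD_insert_self, PySem.Dict.insert_insert_self,
      PySem.Dict.getD_of_not_contains]
    simp [h]

theorem pv_main (codes ranks : List Int) :
    create_level_dict codes ranks = create_level_dict_alt codes ranks := by
  simp only [create_level_dict, create_level_dict_alt, reverse_ranks]
  rw [List.zip_map_right]
  generalize (PySem.List.max? ranks (fun x => x)).getD 0 = mr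
  rw [show (Prod.map (id : Int → Int) fun rank => mr - rank + 1)
      = (fun p : Int × Int => (p.1, mr - p.2 + 1)) from funext (fun p => rfl)]
  generalize codes.zip ranks = P
  set Q : List (Int × Int) := P.map (fun p => (p.1, mr - p.2 + 1)) with hQ
  set S : List (Int × Int) := PySem.List.sorted Q (fun x => x.2) false with hS
  -- A's loop body is a plain grouped-append modify
  have hbody : (fun (d : PySem.Dict String (List Int)) (p : Int × Int) =>
      (if d.contains ("Level " ++ PySem.Int.toStr p.2) = true then d
       else d.insert ("Level " ++ PySem.Int.toStr p.2) []).modify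
        ("Level " ++ PySem.Int.toStr p.2) [] fun v => v ++ [p.1])
      = fun d p => d.modify ("Level " ++ PySem.Int.toStr p.2) [] (fun v => v ++ [p.1]) := by
    funext d p; exact bodyA_eq d _ p.1
  rw [hbody]
  -- reshape both grouping loops to (key, value) pair form
  have hA : S.foldl
        (fun d p => d.modify ("Level " ++ PySem.Int.toStr p.2) [] (fun v => v ++ [p.1]))
        PySem.Dict.empty
      = (S.map (fun p => ("Level " ++ PySem.Int.toStr p.2, p.1))).foldl
        (fun d q => d.modify q.1 [] (fun v => v ++ [q.2])) PySem.Dict.empty :=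
    (List.foldl_map (f := fun p : Int × Int => ("Level " ++ PySem.Int.toStr p.2, p.1))
      (g := fun (d : PySem.Dict String (List Int)) (q : String × Int) =>
        d.modify q.1 [] (fun v => v ++ [q.2]))).symm
  have hB : P.foldl (fun d p => d.modify (mr - p.2 + 1) [] (fun v => v ++ [p.1]))
        PySem.Dict.empty
      = (Q.map (fun q => (q.2, q.1))).foldl
        (fun d q => d.modify q.1 [] (fun v => v ++ [q.2])) PySem.Dict.empty := by
    rw [hQ, List.map_map]
    exact (List.foldl_map
      (f := ((fun q : Int × Int => (q.2, q.1)) ∘ fun p : Int × Int => (p.1, mr - p.2 + 1)))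
      (g := fun (d : PySem.Dict Int (List Int)) (q : Int × Int) =>
        d.modify q.1 [] (fun v => v ++ [q.2]))).symm
  rw [hA, hB]
  set S' : List (String × Int) := S.map (fun p => ("Level " ++ PySem.Int.toStr p.2, p.1)) with hS'
  set Q' : List (Int × Int) := Q.map (fun q => (q.2, q.1)) with hQ'
  set dA := S'.foldl (fun d q => d.modify q.1 [] (fun v => v ++ [q.2])) PySem.Dict.empty with hdA
  set dB := Q'.foldl (fun d q => d.modify q.1 [] (fun v => v ++ [q.2])) PySem.Dict.empty with hdB
  have hnodA : dA.keys.Nodup := by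
    rw [hdA]
    exact PySem.Dict.nodup_keys_foldl_modify_key S' Prod.fst []
      (fun _ q => fun v => v ++ [q.2]) PySem.Dict.empty (by simp)
  -- keys of the two dicts
  have hkA : dA.keys = (PySem.Set.ofList (S.map (fun p => p.2))).map
      (fun r => "Level " ++ PySem.Int.toStr r) := by
    rw [hdA]
    rw [PySem.Dict.keys_foldl_modify_key S' Prod.fst [] (fun _ q => fun v => v ++ [q.2])
      PySem.Dict.empty]
    have : S'.map Prod.fst = (S.map (fun p => p.2)).map (fun r => "Level " ++ PySem.Int.toStr r) := by
      rw [hS', List.map_map, List.map_map]; rfl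
    rw [this]
    have hemp : (PySem.Dict.empty : PySem.Dict String (List Int)).keys = [] := rfl
    rw [hemp, PySem.Set.update_nil_left]
    exact pv_ofList_map _ lvl_inj _
  have hkB : dB.keys = PySem.Set.ofList (Q.map (fun q => q.2)) := by
    rw [hdB]
    rw [PySem.Dict.keys_foldl_modify_key Q' Prod.fst [] (fun _ q => fun v => v ++ [q.2])
      PySem.Dict.empty]
    have : Q'.map Prod.fst = Q.map (fun q => q.2) := by rw [hQ', List.map_map]; rfl
    have hemp : (PySem.Dict.empty : PySem.Dict Int (List Int)).keys = [] := rfl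
    rw [this, hemp, PySem.Set.update_nil_left]
  -- the sorted distinct keys of B are exactly the distinct keys of the sorted list
  have hsort : PySem.List.sorted (PySem.Set.ofList (Q.map (fun q => q.2))) (fun r => r) false
      = PySem.Set.ofList (S.map (fun p => p.2)) := by
    apply PySem.List.sorted_eq_of_perm_of_pairwise_lt
    · exact pv_ofList_perm ((PySem.List.sorted_perm Q (fun x => x.2) false).map _)
    · exact pv_ofList_pairwise_lt _ (PySem.List.sorted_map_key_pairwise Q (fun x => x.2))
  -- values at a key agree
  have hval : ∀ r : Int, dA.getD ("Level " ++ PySem.Int.toStr r) [] = dB.getD r [] := by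
    intro r
    rw [hdA, hdB,
      PySem.Dict.getD_foldl_modify_append S' PySem.Dict.empty ("Level " ++ PySem.Int.toStr r),
      PySem.Dict.getD_foldl_modify_append Q' PySem.Dict.empty r]
    have hemp1 : (PySem.Dict.empty : PySem.Dict String (List Int)).getD
        ("Level " ++ PySem.Int.toStr r) [] = [] := rfl
    have hemp2 : (PySem.Dict.empty : PySem.Dict Int (List Int)).getD r [] = [] := rfl
    rw [hemp1, hemp2, List.nil_append, List.nil_append, hS', hQ', List.filter_map,
      List.filter_map, List.map_map, List.map_map]
    have h1 : (S.filter ((fun q => q.1 == ("Level " ++ PySem.Int.toStr r)) ∘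
        (fun p => ("Level " ++ PySem.Int.toStr p.2, p.1))))
        = S.filter (fun y => y.2 == r) := by
      apply List.filter_congr
      intro p _
      simp only [Function.comp_apply]
      by_cases h : p.2 = r
      · simp [h]
      · have h' : ¬ ("Level " ++ PySem.Int.toStr p.2 = "Level " ++ PySem.Int.toStr r) :=
          fun hc => h (lvl_inj _ _ hc)
        simp [h, h']
    have h2 : (Q.filter ((fun q => q.1 == r) ∘ (fun q => (q.2, q.1))))
        = Q.filter (fun y => y.2 == r) := by
      apply List.filter_congr
      intro q _
      rfl
    rw [h1, h2, hS, pv_sorted_filter (fun x => x.2) r Q]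
    rfl
  -- assemble
  rw [PySem.Dict.items_eq_map_keys dA hnodA ([] : List Int), hkA, hkB, hsort, List.map_map]
  apply List.map_congr_left
  intro r _
  show ("Level " ++ PySem.Int.toStr r, dA.getD ("Level " ++ PySem.Int.toStr r) [])
      = ("Level " ++ PySem.Int.toStr r, dB.getD r [])
  rw [hval r]

-- ===== VERDICT (by name: the statement is the Claim_ definition above) =====
theorem create_level_dict_spec : Claim_equal_create_level_dict := by
  intro codes ranks _ _
  exact pv_main codes ranks
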